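-- pv_equiv track=rewrite | github.com/Hauzknecht/advent_of_code_2023 | day2/day2.py | valid_game
-- ===== SOURCE A (Python) =====
-- RED_CUBES = 12
--
-- GREEN_CUBES = 13
--
-- BLUE_CUBES = 14
--
-- def valid_game(game):
--     for draw in game:
--         if "red" in draw:
--             if draw["red"] > RED_CUBES: return False
--         if "green" in draw:
--             if draw["green"] > GREEN_CUBES: return False
--         if "blue" in draw:
--             if draw["blue"] > BLUE_CUBES: return False
--     return True
-- ===== SOURCE B (Python) =====
-- RED_CUBES = 12
--
-- GREEN_CUBES = 13
--
-- BLUE_CUBES = 14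
--
-- def valid_game(game):
--     red_max = green_max = blue_max = 0
--     for draw in game:
--         red_max = max(red_max, draw.get("red", 0))
--         green_max = max(green_max, draw.get("green", 0))
--         blue_max = max(blue_max, draw.get("blue", 0))
--     return red_max <= RED_CUBES and green_max <= GREEN_CUBES and blue_max <= BLUE_CUBES
-- ===== Notes on version B (the rewrite author's own statement) =====
-- stated objective: alternative
-- what changed: Replaces the per-draw branch-and-early-return scan with a single aggregation pass computing the maximum red/green/blue counts (default 0 for missing keys) followed by one final three-way comparison.
import Mathlib
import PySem

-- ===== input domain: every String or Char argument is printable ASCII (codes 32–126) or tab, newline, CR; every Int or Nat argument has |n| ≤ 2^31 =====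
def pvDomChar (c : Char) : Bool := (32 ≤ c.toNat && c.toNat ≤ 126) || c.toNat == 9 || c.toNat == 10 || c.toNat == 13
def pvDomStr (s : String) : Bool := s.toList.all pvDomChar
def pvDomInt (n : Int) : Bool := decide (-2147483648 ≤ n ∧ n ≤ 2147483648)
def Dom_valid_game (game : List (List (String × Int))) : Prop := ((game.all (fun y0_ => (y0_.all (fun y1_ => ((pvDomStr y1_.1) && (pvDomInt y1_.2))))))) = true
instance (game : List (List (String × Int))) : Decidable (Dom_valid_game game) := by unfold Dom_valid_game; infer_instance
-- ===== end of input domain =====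

-- B aggregates the per-color maxima in one pass and compares once at the end, instead of A's per-draw branch-and-early-return; alternative decomposition, same cost.

-- ===== PORT A =====
-- A: for draw in game: three membership-guarded early returns, then True.
def valid_game (game : List (List (String × Int))) : Bool :=
  match game with
  | [] => true
  | draw :: rest =>
    let d := PySem.Dict.mk draw
    if d.contains "red" && decide (d.getD "red" 0 > 12) then false
    else if d.contains "green" && decide (d.getD "green" 0 > 13) then false
    else if d.contains "blue" && decide (d.getD "blue" 0 > 14) then false
    else valid_game rest

-- ===== PORT B =====
-- B: one fold accumulating (red_max, green_max, blue_max), then a single comparison.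
def stepB (acc : Int × Int × Int) (draw : List (String × Int)) : Int × Int × Int :=
  let d := PySem.Dict.mk draw
  (max acc.1 (d.getD "red" 0), max acc.2.1 (d.getD "green" 0), max acc.2.2 (d.getD "blue" 0))

def finalB (m : Int × Int × Int) : Bool :=
  decide (m.1 ≤ 12) && decide (m.2.1 ≤ 13) && decide (m.2.2 ≤ 14)

def valid_game_alt (game : List (List (String × Int))) : Bool :=
  finalB (game.foldl stepB (0, 0, 0))

-- ===== PRECONDITION & SPEC =====
def Spec_valid_game (game : List (List (String × Int))) (out : Bool) : Prop := out = valid_game_alt game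
instance (game : List (List (String × Int))) (out : Bool) : Decidable (Spec_valid_game game out) := by unfold Spec_valid_game; infer_instance

-- ===== CLAIM (what is proved, stated in full; the proofs are below) =====
def Claim_equal_valid_game : Prop := ∀ (game : List (List (String × Int))), Dom_valid_game game → Spec_valid_game game (valid_game game)

-- ===== LEMMAS AND PROOFS =====

-- per-draw admissibility, the common characterisation of both programs
def drawOk (draw : List (String × Int)) : Bool :=
  let d := PySem.Dict.mk draw
  decide (d.getD "red" 0 ≤ 12) && decide (d.getD "green" 0 ≤ 13) && decide (d.getD "blue" 0 ≤ 14)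

lemma guard_eq (draw : List (String × Int)) (k : String) (L : Int) (hL : 0 < L) :
    ((PySem.Dict.mk draw).contains k && decide ((PySem.Dict.mk draw).getD k 0 > L)) =
      !decide ((PySem.Dict.mk draw).getD k 0 ≤ L) := by
  set d := PySem.Dict.mk draw with hd
  by_cases h : d.contains k = true
  · simp [h, ← decide_not]
  · have h' : d.contains k = false := by simpa using h
    rw [PySem.Dict.getD_of_not_contains d 0 h']
    simp [h', hL.le]

lemma valid_game_eq_all (game : List (List (String × Int))) :
    valid_game game = game.all drawOk := by
  induction game with
  | nil => rfl
  | cons draw rest ih =>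
    rw [valid_game]
    rw [guard_eq draw "red" 12 (by norm_num), guard_eq draw "green" 13 (by norm_num),
        guard_eq draw "blue" 14 (by norm_num)]
    by_cases hr : ((PySem.Dict.mk draw).getD "red" 0 ≤ 12) <;>
      by_cases hg : ((PySem.Dict.mk draw).getD "green" 0 ≤ 13) <;>
        by_cases hb : ((PySem.Dict.mk draw).getD "blue" 0 ≤ 14) <;>
          simp [hr, hg, hb, drawOk, ih]

lemma alt_fold (game : List (List (String × Int))) (r g b : Int) :
    finalB (game.foldl stepB (r, g, b)) =
    ((decide (r ≤ 12) && decide (g ≤ 13) && decide (b ≤ 14)) && game.all drawOk) := by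
  induction game generalizing r g b with
  | nil => simp only [List.foldl_nil, List.all_nil, Bool.and_true]; rfl
  | cons draw rest ih =>
    simp only [List.foldl_cons, List.all_cons]
    rw [show stepB (r, g, b) draw = (max r ((PySem.Dict.mk draw).getD "red" 0),
      max g ((PySem.Dict.mk draw).getD "green" 0), max b ((PySem.Dict.mk draw).getD "blue" 0)) from rfl,
      ih]
    simp only [drawOk, max_le_iff, Bool.decide_and]
    ac_rfl

lemma alt_eq_all (game : List (List (String × Int))) :
    valid_game_alt game = game.all drawOk := by
  have := alt_fold game 0 0 0
  simpa [valid_game_alt] using this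

-- ===== VERDICT (by name: the statement is the Claim_ definition above) =====
theorem valid_game_spec : Claim_equal_valid_game := by
  intro game _
  unfold Spec_valid_game
  rw [valid_game_eq_all, alt_eq_all]
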